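-- pv_equiv track=rewrite | github.com/CIA-Oceanix/GeoTrackNet | contrario_utils.py | zero_segments
-- ===== SOURCE A (Python) =====
-- def zero_segments(x_):
--     """Return list of consecutive zeros from x_"""
--     run = []
--     result = []
--     for d_i in range(len(x_)):
--         if x_[d_i] == 0:
--             run.append(d_i)
--         else:
--             if len(run) != 0:
--                 result.append(run)
--                 run = []
--     if len(run) != 0:
--         result.append(run)
--         run = []
--     return result
-- ===== SOURCE B (Python) =====
-- def zero_segments(x_):
--     """Return list of consecutive zeros from x_"""
--     n = len(x_)
--     starts = [i for i in range(n) if x_[i] == 0 and (i == 0 or x_[i - 1] != 0)]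
--     ends = [i for i in range(n) if x_[i] == 0 and (i == n - 1 or x_[i + 1] != 0)]
--     return [list(range(s, e + 1)) for s, e in zip(starts, ends)]
-- ===== Notes on version B (the rewrite author's own statement) =====
-- stated objective: alternative
-- what changed: Instead of one stateful pass with a current-run buffer and two flush sites, B detects run boundaries declaratively: it filters the start indices (zero with non-zero or absent left neighbour) and end indices (zero with non-zero or absent right neighbour) in two comprehensions and materializes each segment as range(s, e+1) from the zipped boundary pairs.
import Mathlib
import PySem

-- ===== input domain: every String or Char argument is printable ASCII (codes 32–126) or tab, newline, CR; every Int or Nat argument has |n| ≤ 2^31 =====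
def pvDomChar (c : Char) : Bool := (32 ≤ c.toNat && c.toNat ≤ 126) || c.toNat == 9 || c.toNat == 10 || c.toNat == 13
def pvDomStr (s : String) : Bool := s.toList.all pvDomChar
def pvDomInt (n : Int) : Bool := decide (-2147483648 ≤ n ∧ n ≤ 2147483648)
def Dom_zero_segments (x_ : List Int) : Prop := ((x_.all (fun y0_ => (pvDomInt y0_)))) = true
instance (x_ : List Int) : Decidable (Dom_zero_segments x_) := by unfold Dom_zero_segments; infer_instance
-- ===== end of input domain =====

-- B replaces A's stateful run buffer with declarative boundary detection: filter the start
-- indices and end indices of zero runs, then materialize each segment as range(s, e+1)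
-- (objective: alternative algorithm, same O(n) cost).

-- ===== PORT A =====
def zero_segments (x_ : List Int) : List (List Int) :=
  let st := (PySem.List.pyRange 0 (PySem.List.len x_) 1).foldl
    (fun (s : List Int × List (List Int)) d_i =>
      if PySem.List.pyGetD x_ d_i 0 = 0 then (s.1 ++ [d_i], s.2)
      else if s.1.length ≠ 0 then ([], s.2 ++ [s.1]) else s)
    ([], [])
  if st.1.length ≠ 0 then st.2 ++ [st.1] else st.2

-- ===== PORT B =====
def zero_segments_alt (x_ : List Int) : List (List Int) :=
  let n := PySem.List.len x_
  let starts := (PySem.List.pyRange 0 n 1).filter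
    (fun i => PySem.List.pyGetD x_ i 0 == 0 && (i == 0 || !(PySem.List.pyGetD x_ (i - 1) 0 == 0)))
  let ends := (PySem.List.pyRange 0 n 1).filter
    (fun i => PySem.List.pyGetD x_ i 0 == 0 && (i == n - 1 || !(PySem.List.pyGetD x_ (i + 1) 0 == 0)))
  List.zipWith (fun s e => PySem.List.pyRange s (e + 1) 1) starts ends

-- ===== PRECONDITION & SPEC =====
def Spec_zero_segments (x_ : List Int) (out : List (List Int)) : Prop := out = zero_segments_alt x_
instance (x_ : List Int) (out : List (List Int)) : Decidable (Spec_zero_segments x_ out) := by unfold Spec_zero_segments; infer_instance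

-- ===== CLAIM (what is proved, stated in full; the proofs are below) =====
def Claim_equal_zero_segments : Prop := ∀ (x_ : List Int), Dom_zero_segments x_ → Spec_zero_segments x_ (zero_segments x_)

-- ===== LEMMAS AND PROOFS =====

-- test "x_[i] == 0"
def pvZero (x_ : List Int) (i : Int) : Bool := PySem.List.pyGetD x_ i 0 == 0

-- A's loop written as structural recursion on the index list (run = pending buffer).
def pvSegFrom (x_ : List Int) (run : List Int) : List Int → List (List Int)
  | [] => if run.length ≠ 0 then [run] else []
  | i :: t => if PySem.List.pyGetD x_ i 0 = 0 then pvSegFrom x_ (run ++ [i]) t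
              else if run.length ≠ 0 then run :: pvSegFrom x_ [] t else pvSegFrom x_ run t

lemma pvA_foldl (x_ : List Int) (l : List Int) : ∀ (run : List Int) (res : List (List Int)),
    (let st := l.foldl
      (fun (s : List Int × List (List Int)) d_i =>
        if PySem.List.pyGetD x_ d_i 0 = 0 then (s.1 ++ [d_i], s.2)
        else if s.1.length ≠ 0 then ([], s.2 ++ [s.1]) else s)
      (run, res)
     if st.1.length ≠ 0 then st.2 ++ [st.1] else st.2) = res ++ pvSegFrom x_ run l := by
  induction l with
  | nil => intro run res; by_cases h : run.length ≠ 0 <;> simp [pvSegFrom, h]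
  | cons i t ih =>
    intro run res
    by_cases h : PySem.List.pyGetD x_ i 0 = 0
    · simpa [pvSegFrom, h] using ih (run ++ [i]) res
    · by_cases hr : run.length ≠ 0
      · have hrn : run ≠ [] := by intro hc; simp [hc] at hr
        simpa [pvSegFrom, h, hr, hrn] using ih [] (res ++ [run])
      · have hrn : run = [] := by simpa using hr
        simpa [pvSegFrom, h, hr, hrn] using ih run res

-- the run-start indices of a suffix, given whether the previous element was zero
def pvStartsF (x_ : List Int) (p : Bool) : List Int → List Int
  | [] => []
  | i :: t => (if pvZero x_ i && !p then [i] else []) ++ pvStartsF x_ (pvZero x_ i) t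

-- the run-end indices of a suffix, emitting a pending run's last index lazily
def pvEndsP (x_ : List Int) (pend : Option Int) : List Int → List Int
  | [] => pend.toList
  | i :: t => (match pend with
               | some j => if !(pvZero x_ i) then [j] else []
               | none => []) ++ pvEndsP x_ (if pvZero x_ i then some i else none) t

lemma pvMain (x_ : List Int) (m : Nat) : ∀ k : Int,
    (List.zipWith (fun s e => PySem.List.pyRange s (e + 1) 1)
        (pvStartsF x_ false (PySem.List.pyRange k (k + m) 1))
        (pvEndsP x_ none (PySem.List.pyRange k (k + m) 1))
      = pvSegFrom x_ [] (PySem.List.pyRange k (k + m) 1))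
    ∧ (∀ s : Int, s < k →
      List.zipWith (fun s e => PySem.List.pyRange s (e + 1) 1)
          (s :: pvStartsF x_ true (PySem.List.pyRange k (k + m) 1))
          (pvEndsP x_ (some (k - 1)) (PySem.List.pyRange k (k + m) 1))
        = pvSegFrom x_ (PySem.List.pyRange s k 1) (PySem.List.pyRange k (k + m) 1)) := by
  induction m with
  | zero =>
    intro k
    rw [show k + (0:Nat) = k by push_cast; ring, PySem.List.pyRange_one_eq_nil le_rfl]
    refine ⟨by simp [pvStartsF, pvEndsP, pvSegFrom], ?_⟩
    intro s hs
    have hne : PySem.List.pyRange s k 1 ≠ [] := by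
      have := PySem.List.length_pyRange_one s k
      intro hc; rw [hc] at this; simp at this; omega
    simp [pvStartsF, pvEndsP, pvSegFrom, hne, hs, show k - 1 + 1 = k from by ring]
  | succ m ih =>
    intro k
    have hk : k < k + (m + 1 : Nat) := by push_cast; omega
    have hcons := PySem.List.pyRange_one_cons hk
    have hub : k + 1 + (m : Nat) = k + ((m + 1 : Nat) : Int) := by push_cast; ring
    by_cases hz : pvZero x_ k = true
    · have hz' : PySem.List.pyGetD x_ k 0 = 0 := by
        simpa [pvZero] using hz
      constructor
      · rw [hcons]
        simp only [pvStartsF, pvEndsP, pvSegFrom, hz, hz']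
        have := (ih (k + 1)).2 k (by omega)
        rw [hub] at this
        simpa [PySem.List.pyRange_one_singleton] using this
      · intro s hs
        rw [hcons]
        simp only [pvStartsF, pvEndsP, pvSegFrom, hz, hz']
        have := (ih (k + 1)).2 s (by omega)
        rw [hub] at this
        rw [show k + 1 - 1 = k by ring] at this
        have happ : PySem.List.pyRange s k 1 ++ [k] = PySem.List.pyRange s (k + 1) 1 := by
          rw [PySem.List.pyRange_one_succ_right (le_of_lt hs)]
        simpa [happ] using this
    · have hz' : ¬ PySem.List.pyGetD x_ k 0 = 0 := by
        simpa [pvZero] using hz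
      have hzf : pvZero x_ k = false := by simpa using hz
      constructor
      · rw [hcons]
        simp only [pvStartsF, pvEndsP, pvSegFrom, hzf, hz']
        have := (ih (k + 1)).1
        rw [hub] at this
        simpa using this
      · intro s hs
        rw [hcons]
        have hne : PySem.List.pyRange s k 1 ≠ [] := by
          have := PySem.List.length_pyRange_one s k
          intro hc; rw [hc] at this; simp at this; omega
        have htop := (ih (k + 1)).1
        rw [show k + 1 + (m : Int) = k + ((m : Int) + 1) from by ring] at htop
        simp [pvStartsF, pvEndsP, pvSegFrom, hzf, hz', hne, hs, htop,
          show k - 1 + 1 = k from by ring]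

-- B's start filter computes pvStartsF
lemma pvStarts_filter (x_ : List Int) (m : Nat) : ∀ (k : Int) (p : Bool), 0 ≤ k →
    p = (decide (k ≠ 0) && pvZero x_ (k - 1)) →
    (PySem.List.pyRange k (k + m) 1).filter
        (fun i => PySem.List.pyGetD x_ i 0 == 0 && (i == 0 || !(PySem.List.pyGetD x_ (i - 1) 0 == 0)))
      = pvStartsF x_ p (PySem.List.pyRange k (k + m) 1) := by
  induction m with
  | zero =>
    intro k p hk hp
    rw [show k + (0:Nat) = k by push_cast; ring, PySem.List.pyRange_one_eq_nil le_rfl]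
    simp [pvStartsF]
  | succ m ih =>
    intro k p hk hp
    have hkk : k < k + (m + 1 : Nat) := by push_cast; omega
    rw [PySem.List.pyRange_one_cons hkk]
    have hub : k + 1 + (m : Nat) = k + ((m + 1 : Nat) : Int) := by push_cast; ring
    have ih' := ih (k + 1) (pvZero x_ k) (by omega)
      (by rw [show k + 1 - 1 = k by ring]; simp [show k + 1 ≠ 0 by omega])
    rw [hub] at ih'
    have hcond : (PySem.List.pyGetD x_ k 0 == 0
        && ((k == 0) || !(PySem.List.pyGetD x_ (k - 1) 0 == 0))) = (pvZero x_ k && !p) := by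
      subst hp
      by_cases h0 : k = 0
      · subst h0; simp [pvZero]
      · have hb : (k == 0) = false := by simpa using h0
        simp [pvZero, hb, h0]
    rw [List.filter_cons, ih', hcond]
    cases hzv : (pvZero x_ k && !p) <;> simp [pvStartsF, hzv]

-- B's end filter computes pvEndsP (n = len x_, k + m = n)
lemma pvEnds_filter (x_ : List Int) (n : Int) (m : Nat) : ∀ k : Int, k + m = n →
    ((PySem.List.pyRange k n 1).filter
        (fun i => PySem.List.pyGetD x_ i 0 == 0 && (i == n - 1 || !(PySem.List.pyGetD x_ (i + 1) 0 == 0)))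
      = pvEndsP x_ none (PySem.List.pyRange k n 1))
    ∧ (pvZero x_ (k - 1) = true →
      (if (PySem.List.pyGetD x_ (k - 1) 0 == 0 && ((k - 1 : Int) == n - 1 || !(PySem.List.pyGetD x_ (k - 1 + 1) 0 == 0))) then [k - 1] else [])
          ++ (PySem.List.pyRange k n 1).filter
        (fun i => PySem.List.pyGetD x_ i 0 == 0 && (i == n - 1 || !(PySem.List.pyGetD x_ (i + 1) 0 == 0)))
      = pvEndsP x_ (some (k - 1)) (PySem.List.pyRange k n 1)) := by
  induction m with
  | zero =>
    intro k hkn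
    have hk : k = n := by push_cast at hkn; omega
    subst hk
    rw [PySem.List.pyRange_one_eq_nil le_rfl]
    refine ⟨by simp [pvEndsP], ?_⟩
    intro hq
    have : (PySem.List.pyGetD x_ (k - 1) 0 == 0) = true := hq
    simp [pvEndsP, Option.toList, this]
  | succ m ih =>
    intro k hkn
    have hkk : k < n := by push_cast at hkn; omega
    have hcons := PySem.List.pyRange_one_cons hkk
    have ih' := ih (k + 1) (by push_cast at hkn ⊢; omega)
    by_cases hz : pvZero x_ k = true
    · have hzt : (PySem.List.pyGetD x_ k 0 == 0) = true := hz
      have ih2 := ih'.2 (by rw [show k + 1 - 1 = k by ring]; exact hz)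
      rw [show k + 1 - 1 = k by ring] at ih2
      constructor
      · rw [hcons]
        have hstep : pvEndsP x_ none (k :: PySem.List.pyRange (k + 1) n 1)
            = pvEndsP x_ (some k) (PySem.List.pyRange (k + 1) n 1) := by
          simp [pvEndsP, hz]
        rw [List.filter_cons, hstep, ← ih2]
        by_cases hc : (PySem.List.pyGetD x_ k 0 == 0
            && ((k : Int) == n - 1 || !(PySem.List.pyGetD x_ (k + 1) 0 == 0))) = true
        · simp [hc]
        · simp [hc]
      · intro hq
        have hknot : ((k - 1 : Int) == n - 1) = false := by
          simp; omega
        have hnext : (PySem.List.pyGetD x_ (k - 1 + 1) 0 == 0) = true := by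
          rw [show k - 1 + 1 = k by ring]; exact hz
        rw [hcons]
        have hstep : pvEndsP x_ (some (k - 1)) (k :: PySem.List.pyRange (k + 1) n 1)
            = pvEndsP x_ (some k) (PySem.List.pyRange (k + 1) n 1) := by
          simp [pvEndsP, hz]
        rw [hstep, ← ih2, hknot, hnext]
        simp only [List.filter_cons]
        split_ifs <;> simp_all
    · have hzf : (PySem.List.pyGetD x_ k 0 == 0) = false := by simpa [pvZero] using hz
      have hzf' : pvZero x_ k = false := by simpa using hz
      constructor
      · rw [hcons]
        simp only [pvEndsP, hzf', List.filter_cons, hzf]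
        simpa using ih'.1
      · intro hq
        have hqt : (PySem.List.pyGetD x_ (k - 1) 0 == 0) = true := hq
        have hnext : (PySem.List.pyGetD x_ (k - 1 + 1) 0 == 0) = false := by
          rw [show k - 1 + 1 = k by ring]; exact hzf
        rw [hcons]
        have hstep : pvEndsP x_ (some (k - 1)) (k :: PySem.List.pyRange (k + 1) n 1)
            = [k - 1] ++ pvEndsP x_ none (PySem.List.pyRange (k + 1) n 1) := by
          simp [pvEndsP, hzf']
        rw [hstep, List.filter_cons]
        simp [hqt, hnext, hzf, ih'.1]

-- ===== VERDICT (by name: the statement is the Claim_ definition above) =====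
theorem zero_segments_spec : Claim_equal_zero_segments := by
  intro x_ _
  unfold Spec_zero_segments zero_segments zero_segments_alt
  rw [pvA_foldl x_ (PySem.List.pyRange 0 (PySem.List.len x_) 1) [] [], List.nil_append]
  show pvSegFrom x_ [] (PySem.List.pyRange 0 (PySem.List.len x_) 1)
    = List.zipWith (fun s e => PySem.List.pyRange s (e + 1) 1)
        ((PySem.List.pyRange 0 (PySem.List.len x_) 1).filter
          (fun i => PySem.List.pyGetD x_ i 0 == 0 && (i == 0 || !(PySem.List.pyGetD x_ (i - 1) 0 == 0))))
        ((PySem.List.pyRange 0 (PySem.List.len x_) 1).filter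
          (fun i => PySem.List.pyGetD x_ i 0 == 0 &&
            (i == PySem.List.len x_ - 1 || !(PySem.List.pyGetD x_ (i + 1) 0 == 0))))
  have hm : PySem.List.len x_ = (((PySem.List.len x_).toNat : Nat) : Int) := by
    simp [PySem.List.len]
  rw [hm]
  have hs := pvStarts_filter x_ (PySem.List.len x_).toNat 0 false le_rfl (by simp)
  have hE := (pvEnds_filter x_ (((PySem.List.len x_).toNat : Nat) : Int)
    (PySem.List.len x_).toNat 0 (by simp)).1
  have hMain := (pvMain x_ (PySem.List.len x_).toNat 0).1
  simp only [zero_add] at hs hMain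
  rw [hs, hE]
  exact hMain.symm
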